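-- pv_equiv track=rewrite | github.com/lllll081926i/Ankismart | src/ankismart/ui/workers.py | _distribute_counts_per_document
-- ===== SOURCE A (Python) =====
-- def _distribute_counts_per_document(
--     total_docs: int,
--     strategy_counts: dict[str, int],
-- ) -> list[dict[str, int]]:
--     """Distribute strategy card counts across documents.
--
--     Args:
--         total_docs: Number of documents
--         strategy_counts: Dictionary mapping strategy names to total card counts
--
--     Returns:
--         List of dictionaries, one per document, mapping strategy to count
--     """
--     if total_docs <= 0:
--         return []
--
--     per_doc: list[dict[str, int]] = [dict() for _ in range(total_docs)]
--
--     for strategy, total in strategy_counts.items():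
--         if total <= 0:
--             continue
--
--         # Distribute evenly with remainder handling
--         base = total // total_docs
--         remainder = total % total_docs
--
--         for idx in range(total_docs):
--             # First 'remainder' documents get one extra card
--             value = base + (1 if idx < remainder else 0)
--             if value > 0:
--                 per_doc[idx][strategy] = value
--
--     return per_doc
-- ===== SOURCE B (Python) =====
-- def _distribute_counts_per_document(
--     total_docs: int,
--     strategy_counts: dict[str, int],
-- ) -> list[dict[str, int]]:
--     """Progressive dealing: no base/remainder is ever computed.  The first
--     document takes the ceiling share ceil(t / docs_left) of each remaining
--     total, those shares are subtracted, and the process repeats with one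
--     document fewer until none are left."""
--     remaining = [(s, t) for s, t in strategy_counts.items() if t > 0]
--     result = []
--     for docs_left in range(total_docs, 0, -1):
--         doc = {}
--         nxt = []
--         for s, t in remaining:
--             share = -(-t // docs_left)  # ceiling division
--             if share > 0:
--                 doc[s] = share
--             nxt.append((s, t - share))
--         remaining = nxt
--         result.append(doc)
--     return result
-- ===== Notes on version B (the rewrite author's own statement) =====
-- stated objective: alternative
-- what changed: B never computes base=total//docs or a remainder: it deals the documents one at a time, giving the current first document ceil(t/docs_left) of each strategy's remaining total, subtracting that share and recursing with one document fewer; A computes base/remainder per strategy and fills a preallocated list of dicts strategy-major.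
import Mathlib
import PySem

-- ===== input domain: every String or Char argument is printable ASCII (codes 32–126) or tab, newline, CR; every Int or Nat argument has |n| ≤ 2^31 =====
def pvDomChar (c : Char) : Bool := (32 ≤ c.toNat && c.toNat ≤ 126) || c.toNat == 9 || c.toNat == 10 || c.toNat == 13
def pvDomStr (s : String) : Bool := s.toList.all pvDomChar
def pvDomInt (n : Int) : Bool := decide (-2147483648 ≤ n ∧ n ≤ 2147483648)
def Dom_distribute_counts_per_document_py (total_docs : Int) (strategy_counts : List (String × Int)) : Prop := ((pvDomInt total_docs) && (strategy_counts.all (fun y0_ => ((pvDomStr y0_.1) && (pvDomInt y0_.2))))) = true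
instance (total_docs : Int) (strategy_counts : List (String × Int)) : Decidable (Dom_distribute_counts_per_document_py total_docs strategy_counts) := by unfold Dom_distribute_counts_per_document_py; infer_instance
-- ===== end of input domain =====

-- B replaces A's base/remainder arithmetic by progressive dealing (ceiling share of the remaining total, one document at a time); same cost, alternative algorithm.


-- ===== PORT A =====
-- A-side helper: the body of A's outer 'for strategy, total in strategy_counts.items()' loop
def pvStepA (total_docs : Int) (pd : List (PySem.Dict String Int)) (sp : String × Int) :
    List (PySem.Dict String Int) :=
  if sp.2 ≤ 0 then pd
  else
    let base := PySem.Int.floordiv sp.2 total_docs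
    let remainder := PySem.Int.mod sp.2 total_docs
    -- 'for idx in range(total_docs): … per_doc[idx][strategy] = value' = indexed update of each slot
    pd.mapIdx (fun idx d =>
      let value := base + (if (idx : Int) < remainder then 1 else 0)
      if 0 < value then d.insert sp.1 value else d)

def distribute_counts_per_document_py (total_docs : Int) (strategy_counts : List (String × Int)) : List (List (String × Int)) :=
  if total_docs ≤ 0 then []
  else
    let per_doc : List (PySem.Dict String Int) := List.replicate total_docs.toNat PySem.Dict.empty
    let per_doc := strategy_counts.foldl (pvStepA total_docs) per_doc
    per_doc.map (·.items)

-- ===== PORT B =====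
-- B-side helper: the inner 'for s, t in remaining' loop — builds this document's dict and the new remaining list
def pvDealDoc (docs_left : Int) (remaining : List (String × Int)) :
    PySem.Dict String Int × List (String × Int) :=
  remaining.foldl (fun acc st =>
      let share := -(PySem.Int.floordiv (-st.2) docs_left)   -- -(-t // docs_left): ceiling division
      ((if 0 < share then acc.1.insert st.1 share else acc.1), acc.2 ++ [(st.1, st.2 - share)]))
    (PySem.Dict.empty, [])

-- B-side helper: the outer 'for docs_left in range(total_docs, 0, -1)' loop
def pvDealLoop (docsLeft : List Int) (remaining : List (String × Int)) : List (List (String × Int)) :=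
  match docsLeft with
  | [] => []
  | d :: ds =>
      let p := pvDealDoc d remaining
      p.1.items :: pvDealLoop ds p.2

def distribute_counts_per_document_py_alt (total_docs : Int) (strategy_counts : List (String × Int)) : List (List (String × Int)) :=
  pvDealLoop (PySem.List.pyRange total_docs 0 (-1)) (strategy_counts.filter (fun sp => 0 < sp.2))

-- ===== PRECONDITION & SPEC =====
def Spec_distribute_counts_per_document_py (total_docs : Int) (strategy_counts : List (String × Int)) (out : List (List (String × Int))) : Prop := out = distribute_counts_per_document_py_alt total_docs strategy_counts
instance (total_docs : Int) (strategy_counts : List (String × Int)) (out : List (List (String × Int))) : Decidable (Spec_distribute_counts_per_document_py total_docs strategy_counts out) := by unfold Spec_distribute_counts_per_document_py; infer_instance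

-- ===== CLAIM (what is proved, stated in full; the proofs are below) =====
def Claim_equal_distribute_counts_per_document_py : Prop := ∀ (total_docs : Int) (strategy_counts : List (String × Int)), Dom_distribute_counts_per_document_py total_docs strategy_counts → Spec_distribute_counts_per_document_py total_docs strategy_counts (distribute_counts_per_document_py total_docs strategy_counts)

-- ===== LEMMAS AND PROOFS =====

-- proof-side bridge: per-strategy (strategy, base, remainder) view of A's arithmetic
def pvTable (total_docs : Int) (strategy_counts : List (String × Int)) : List (String × Int × Int) :=
  (strategy_counts.filter (fun sp => 0 < sp.2)).map
    (fun sp => (sp.1, PySem.Int.floordiv sp.2 total_docs, PySem.Int.mod sp.2 total_docs))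

-- proof-side bridge: what A gives strategy e to document idx
def pvStepB (idx : Nat) (d : PySem.Dict String Int) (e : String × Int × Int) : PySem.Dict String Int :=
  let value := e.2.1 + (if (idx : Int) < e.2.2 then 1 else 0)
  if 0 < value then d.insert e.1 value else d

-- residual total of a strategy after i documents have been dealt, under A's distribution
def pvResid (t n : Int) (i : Nat) : Int :=
  t - (PySem.Int.floordiv t n * i + min (i : Int) (PySem.Int.mod t n))

-- mapIdx over a map of range is a pointwise map
lemma pv_mapIdx_map_range {α β : Type} (n : Nat) (g : Nat → α) (f : Nat → α → β) :
    ((List.range n).map g).mapIdx f = (List.range n).map (fun i => f i (g i)) := by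
  apply List.ext_getElem
  · simp
  · intro i h1 h2
    simp

-- loop interchange: A's strategy-major fold over a range-shaped state equals a document-major map
lemma pv_interchange (total_docs : Int) (sc : List (String × Int)) (n : Nat)
    (g : Nat → PySem.Dict String Int) :
    sc.foldl (pvStepA total_docs) ((List.range n).map g)
      = (List.range n).map (fun i => (pvTable total_docs sc).foldl (pvStepB i) (g i)) := by
  induction sc generalizing g with
  | nil => simp [pvTable]
  | cons sp tl ih =>
    by_cases h : sp.2 ≤ 0
    · have hfil : ¬ (0 < sp.2) := by omega
      simp only [List.foldl_cons, pvStepA, if_pos h, pvTable, List.filter_cons,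
        decide_eq_true_eq]
      rw [if_neg hfil]
      exact ih g
    · have hfil : (0 < sp.2) := by omega
      simp only [List.foldl_cons, pvStepA, if_neg h]
      rw [pv_mapIdx_map_range]
      rw [ih]
      simp only [pvTable, List.filter_cons, decide_eq_true_eq, if_pos hfil, List.map_cons,
        List.foldl_cons]
      apply List.map_congr_left
      intro i _
      rfl

-- the ceiling share of the residual after i documents is exactly A's value for document i
lemma pv_share_eq (t n : Int) (i : Nat) (hn : 0 < n) (hi : (i : Int) < n) :
    -(PySem.Int.floordiv (-(pvResid t n i)) (n - i))
      = PySem.Int.floordiv t n + (if (i : Int) < PySem.Int.mod t n then 1 else 0) := by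
  have h1 := PySem.Int.floordiv_mul_add_mod t n
  have h2 := PySem.Int.mod_nonneg t hn
  have h3 := PySem.Int.mod_lt t hn
  rw [PySem.Int.neg_floordiv_neg_eq_iff_of_pos (by omega : (0:Int) < n - i)]
  unfold pvResid
  rcases lt_or_ge (i : Int) (PySem.Int.mod t n) with hc | hc
  · rw [if_pos hc, min_eq_left (by omega)]
    constructor <;> nlinarith
  · rw [if_neg (by omega), min_eq_right (by omega)]
    constructor <;> nlinarith

-- subtracting that share advances the residual by one document
lemma pv_resid_step (t n : Int) (i : Nat) (hn : 0 < n) :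
    pvResid t n i - (PySem.Int.floordiv t n + (if (i : Int) < PySem.Int.mod t n then 1 else 0))
      = pvResid t n (i + 1) := by
  have h2 := PySem.Int.mod_nonneg t hn
  unfold pvResid
  push_cast
  rcases lt_or_ge (i : Int) (PySem.Int.mod t n) with hc | hc
  · rw [if_pos hc, min_eq_left (by omega), min_eq_left (by omega)]
    ring
  · rw [if_neg (by omega), min_eq_right (by omega), min_eq_right (by omega)]
    ring

-- the inner loop, split into its two components (accumulator generalised for the appends)
lemma pvDealDoc_aux (d : Int) (rem : List (String × Int)) :
    ∀ acc : PySem.Dict String Int × List (String × Int),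
      rem.foldl (fun acc st =>
          let share := -(PySem.Int.floordiv (-st.2) d)
          ((if 0 < share then acc.1.insert st.1 share else acc.1), acc.2 ++ [(st.1, st.2 - share)])) acc
        = (rem.foldl (fun dd st =>
              let share := -(PySem.Int.floordiv (-st.2) d)
              if 0 < share then dd.insert st.1 share else dd) acc.1,
           acc.2 ++ rem.map (fun st => (st.1, st.2 - -(PySem.Int.floordiv (-st.2) d)))) := by
  induction rem with
  | nil => intro acc; simp
  | cons st tl ih =>
    intro acc
    rw [List.foldl_cons, ih]
    simp

lemma pvDealDoc_eq (d : Int) (rem : List (String × Int)) :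
    pvDealDoc d rem
      = (rem.foldl (fun dd st =>
            let share := -(PySem.Int.floordiv (-st.2) d)
            if 0 < share then dd.insert st.1 share else dd) PySem.Dict.empty,
         rem.map (fun st => (st.1, st.2 - -(PySem.Int.floordiv (-st.2) d)))) := by
  unfold pvDealDoc
  rw [pvDealDoc_aux]
  simp

-- main invariant: dealing the last k documents of n, from the residuals after i, yields A's documents i..n-1
lemma pv_deal_spec (n : Int) (hn : 0 < n) (sc : List (String × Int)) :
    ∀ (k i : Nat), (i : Int) + k = n →
      pvDealLoop (PySem.List.pyRange (n - i) 0 (-1))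
          ((sc.filter (fun sp => 0 < sp.2)).map (fun sp => (sp.1, pvResid sp.2 n i)))
        = (List.range' i k).map (fun j => ((pvTable n sc).foldl (pvStepB j) PySem.Dict.empty).items) := by
  intro k
  induction k with
  | zero =>
    intro i hik
    rw [PySem.List.pyRange_neg_one_eq_nil (by omega)]
    simp [pvDealLoop]
  | succ k ih =>
    intro i hik
    have hi : (i : Int) < n := by push_cast at hik ⊢; omega
    rw [PySem.List.pyRange_neg_one_cons (by omega)]
    show (pvDealDoc (n - i) _).1.items :: pvDealLoop _ (pvDealDoc (n - i) _).2 = _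
    rw [pvDealDoc_eq]
    have hdict :
        (((sc.filter (fun sp => 0 < sp.2)).map (fun sp => (sp.1, pvResid sp.2 n i))).foldl
            (fun dd st =>
              let share := -(PySem.Int.floordiv (-st.2) (n - i))
              if 0 < share then dd.insert st.1 share else dd) PySem.Dict.empty)
          = (pvTable n sc).foldl (pvStepB i) PySem.Dict.empty := by
      unfold pvTable
      rw [List.foldl_map, List.foldl_map]
      apply PySem.List.foldl_congr_mem
      intro acc sp hsp
      simp only
      rw [pv_share_eq sp.2 n i hn hi]
      rfl
    have hrem :
        (((sc.filter (fun sp => 0 < sp.2)).map (fun sp => (sp.1, pvResid sp.2 n i))).map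
            (fun st => (st.1, st.2 - -(PySem.Int.floordiv (-st.2) (n - i)))))
          = (sc.filter (fun sp => 0 < sp.2)).map (fun sp => (sp.1, pvResid sp.2 n (i + 1))) := by
      rw [List.map_map]
      apply List.map_congr_left
      intro sp hsp
      simp only [Function.comp]
      rw [pv_share_eq sp.2 n i hn hi, pv_resid_step sp.2 n i hn]
    rw [hdict, hrem]
    have : n - (i : Int) - 1 = n - ((i + 1 : Nat) : Int) := by push_cast; ring
    rw [this, ih (i + 1) (by push_cast at hik ⊢; omega)]
    rw [List.range'_succ]
    rfl

-- residuals before any document is dealt are the original totals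
lemma pv_resid_zero (t n : Int) (hn : 0 < n) : pvResid t n 0 = t := by
  have h2 := PySem.Int.mod_nonneg t hn
  unfold pvResid
  rw [min_eq_left (by omega)]
  simp

-- ===== VERDICT (by name: the statement is the Claim_ definition above) =====
theorem distribute_counts_per_document_py_spec : Claim_equal_distribute_counts_per_document_py := by
  intro total_docs strategy_counts _
  show _ = _
  unfold distribute_counts_per_document_py distribute_counts_per_document_py_alt
  by_cases h : total_docs ≤ 0
  · rw [if_pos h, PySem.List.pyRange_neg_one_eq_nil (by omega)]
    rfl
  · simp only [if_neg h]
    have hn : 0 < total_docs := by omega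
    have hrep : List.replicate total_docs.toNat (PySem.Dict.empty (κ := String) (ν := Int))
        = (List.range total_docs.toNat).map (fun _ => PySem.Dict.empty) := by
      simp [List.map_const']
    rw [hrep, pv_interchange, List.map_map]
    have hfl : strategy_counts.filter (fun sp => 0 < sp.2)
        = (strategy_counts.filter (fun sp => 0 < sp.2)).map (fun sp => (sp.1, pvResid sp.2 total_docs 0)) := by
      apply List.ext_getElem
      · simp
      · intro j h1 h2
        simp [pv_resid_zero _ _ hn]
    rw [hfl]
    rw [show PySem.List.pyRange total_docs 0 (-1)
          = PySem.List.pyRange (total_docs - ((0 : Nat) : Int)) 0 (-1) by norm_num]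
    rw [pv_deal_spec total_docs hn strategy_counts total_docs.toNat 0 (by omega)]
    rw [List.range_eq_range']
    simp
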